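-- pv_equiv track=rewrite | github.com/CettaMa/C-C-- | Python/Sandbox/genetic_fucking_shit.py | kalkulasi_fitness
-- ===== SOURCE A (Python) =====
-- def kalkulasi_fitness(populasi,berat,):
--     i = 0
--     fitness = []
--     for individual in populasi:
--         fitness.append([])
--         sum_fitness=[]
--         #dengan berat
--         for x,y in zip(individual,berat):
--             if x < 0 : # kalo ada gen yang kurang dari 0, fitnessnya langsung 0
--                 sum_fitness = [0]
--                 break
--             else :
--                 sum_fitness.append((x*y)) # ini buat kalkulasi fitnessnya, gen dikali sama beratnya
--         fitness[i].append(sum(sum_fitness)) # trus dimasukin ke dalem list fitness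
--         i += 1
--     return fitness
-- ===== SOURCE B (Python) =====
-- def kalkulasi_fitness(populasi, berat):
--     return [
--         [0] if any(x < 0 for x, _ in zip(individual, berat))
--         else [sum(x * y for x, y in zip(individual, berat))]
--         for individual in populasi
--     ]
-- ===== Notes on version B (the rewrite author's own statement) =====
-- stated objective: simpler
-- what changed: Replaces the fused accumulate-with-early-break loop and index bookkeeping by a list comprehension that does a separate negativity scan (any) and, only when it passes, a product-sum reduction per individual.
import Mathlib
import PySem

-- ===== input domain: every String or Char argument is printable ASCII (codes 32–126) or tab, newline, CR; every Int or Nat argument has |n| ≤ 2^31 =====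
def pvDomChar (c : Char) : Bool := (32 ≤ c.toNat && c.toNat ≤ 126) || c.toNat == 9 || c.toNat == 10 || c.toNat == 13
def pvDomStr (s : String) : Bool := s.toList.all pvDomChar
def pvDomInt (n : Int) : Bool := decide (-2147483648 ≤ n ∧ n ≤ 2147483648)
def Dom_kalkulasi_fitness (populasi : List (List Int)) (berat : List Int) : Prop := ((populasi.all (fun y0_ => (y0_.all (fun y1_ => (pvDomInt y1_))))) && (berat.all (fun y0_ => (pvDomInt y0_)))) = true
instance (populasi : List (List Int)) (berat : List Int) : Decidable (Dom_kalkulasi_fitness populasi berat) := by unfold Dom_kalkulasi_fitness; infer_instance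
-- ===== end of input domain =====

-- ===== PORT A =====
-- B changes only the decomposition (any-guard + sum comprehension instead of one
-- fused break/accumulate loop); objective: simpler. A = B everywhere (total).
-- inner loop of A: walks zip(individual, berat), breaking to [0] on a negative gene,
-- otherwise appending x*y to sum_fitness
def pvInnerA (acc : List Int) : List Int → List Int → List Int
  | x :: xs, y :: ys => if x < 0 then [0] else pvInnerA (acc ++ [x * y]) xs ys
  | _, _ => acc

-- A appends [] then appends the sum into that slot (fitness[i].append), i.e. appends [sum]
def kalkulasi_fitness (populasi : List (List Int)) (berat : List Int) : List (List Int) :=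
  populasi.foldl (fun fitness individual => fitness ++ [[(pvInnerA [] individual berat).sum]]) []

-- ===== PORT B =====
def kalkulasi_fitness_alt (populasi : List (List Int)) (berat : List Int) : List (List Int) :=
  populasi.map (fun individual =>
    if (individual.zip berat).any (fun p => p.1 < 0) then [0]
    else [((individual.zip berat).map (fun p => p.1 * p.2)).sum])

-- ===== PRECONDITION & SPEC =====
def Spec_kalkulasi_fitness (populasi : List (List Int)) (berat : List Int) (out : List (List Int)) : Prop := out = kalkulasi_fitness_alt populasi berat
instance (populasi : List (List Int)) (berat : List Int) (out : List (List Int)) : Decidable (Spec_kalkulasi_fitness populasi berat out) := by unfold Spec_kalkulasi_fitness; infer_instance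

-- ===== CLAIM (what is proved, stated in full; the proofs are below) =====
def Claim_equal_kalkulasi_fitness : Prop := ∀ (populasi : List (List Int)) (berat : List Int), Dom_kalkulasi_fitness populasi berat → Spec_kalkulasi_fitness populasi berat (kalkulasi_fitness populasi berat)

-- ===== LEMMAS AND PROOFS =====
theorem pvInnerA_sum (xs : List Int) : ∀ (ys acc : List Int),
    (pvInnerA acc xs ys).sum =
      if (xs.zip ys).any (fun p => p.1 < 0) then 0
      else acc.sum + ((xs.zip ys).map (fun p => p.1 * p.2)).sum := by
  induction xs with
  | nil => intro ys acc; simp [pvInnerA]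
  | cons x xs ih =>
    intro ys acc
    cases ys with
    | nil => simp [pvInnerA]
    | cons y ys =>
      by_cases hx : x < 0
      · simp [pvInnerA, hx]
      · have hdx : decide (x < 0) = false := by simp [hx]
        simp only [pvInnerA, if_neg hx, ih, List.zip_cons_cons, List.any_cons, hdx,
          Bool.false_or, List.map_cons, List.sum_cons, List.sum_append, List.sum_nil]
        split_ifs with h
        · rfl
        · ring

theorem cell_eq (ind berat : List Int) :
    [(pvInnerA [] ind berat).sum] =
      if (ind.zip berat).any (fun p => p.1 < 0) then [0]
      else [((ind.zip berat).map (fun p => p.1 * p.2)).sum] := by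
  rw [pvInnerA_sum]
  split_ifs <;> simp

theorem kalkulasi_foldl (berat : List Int) (populasi : List (List Int)) :
    ∀ (init : List (List Int)),
      populasi.foldl (fun fitness individual => fitness ++ [[(pvInnerA [] individual berat).sum]]) init =
        init ++ kalkulasi_fitness_alt populasi berat := by
  induction populasi with
  | nil => intro init; simp [kalkulasi_fitness_alt]
  | cons ind rest ih =>
    intro init
    rw [List.foldl_cons, ih, cell_eq]
    simp [kalkulasi_fitness_alt]

-- ===== VERDICT (by name: the statement is the Claim_ definition above) =====
theorem kalkulasi_fitness_spec : Claim_equal_kalkulasi_fitness := by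
  intro populasi berat _
  unfold Spec_kalkulasi_fitness kalkulasi_fitness
  simpa using kalkulasi_foldl berat populasi []
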